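-- pv_equiv track=rewrite | github.com/full-fish/multicampus | example/nlp/dl_nlp/lstm/lstm_02.py | encode_tokens
-- ===== SOURCE A (Python) =====
-- PAD_TOKEN = "[PAD]"  # 패딩 토큰
--
-- UNK_TOKEN = "[UNK]"  # 미등록 단어 토큰
--
-- def encode_tokens(tokens, word2idx, max_len):
--     # 단어를 인덱스로 변환. 단어장에 없으면 UNK_TOKEN 인덱스 사용
--     idxs = [word2idx.get(t, word2idx[UNK_TOKEN]) for t in tokens]
--     idxs_len = len(idxs)
--
--     # 문장 길이가 max_len보다 짧으면 PAD_TOKEN으로 채움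
--     if idxs_len < max_len:
--         idxs += [word2idx[PAD_TOKEN]] * (max_len - idxs_len)
--     # 문장 길이가 max_len보다 길면 잘라냄
--     elif idxs_len > max_len:
--         idxs = idxs[:max_len]
--
--     return idxs
-- ===== SOURCE B (Python) =====
-- PAD_TOKEN = "[PAD]"  # padding token
--
-- UNK_TOKEN = "[UNK]"  # out-of-vocabulary token
--
-- def encode_tokens(tokens, word2idx, max_len):
--     # Walk the output positions BACK-TO-FRONT (max_len-1 .. 0) with an explicit
--     # while loop and accumulator: first the PAD tail, then the encoded tokens,
--     # reversing once at the end.  Truncation falls out of the loop bound; no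
--     # intermediate full index list is ever built.
--     rev = []
--     i = max_len - 1
--     while i >= 0:
--         if i < len(tokens):
--             rev.append(word2idx.get(tokens[i], word2idx[UNK_TOKEN]))
--         else:
--             rev.append(word2idx[PAD_TOKEN])
--         i -= 1
--     rev.reverse()
--     return rev
-- ===== Notes on version B (the rewrite author's own statement) =====
-- stated objective: alternative
-- what changed: B replaces A's staged passes (encode all tokens, then pad or slice) by one explicit while loop with an accumulator that walks the output positions back-to-front (pad tail first, then encoded tokens) and reverses once at the end; truncation falls out of the loop bound and no intermediate full index list is built.
-- intended difference: For max_len < 0 with len(tokens) > -max_len, A returns idxs[:max_len], i.e. the encoded tokens with the last -max_len dropped (a negative-slice artefact), while B returns [] - the intended value, since the result should never be longer than max_len. — e.g. on encode_tokens(["a", "b"], [("a", 1), ("b", 2), ("[UNK]", 0)], -1): A returns [1], B returns []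
import Mathlib
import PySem

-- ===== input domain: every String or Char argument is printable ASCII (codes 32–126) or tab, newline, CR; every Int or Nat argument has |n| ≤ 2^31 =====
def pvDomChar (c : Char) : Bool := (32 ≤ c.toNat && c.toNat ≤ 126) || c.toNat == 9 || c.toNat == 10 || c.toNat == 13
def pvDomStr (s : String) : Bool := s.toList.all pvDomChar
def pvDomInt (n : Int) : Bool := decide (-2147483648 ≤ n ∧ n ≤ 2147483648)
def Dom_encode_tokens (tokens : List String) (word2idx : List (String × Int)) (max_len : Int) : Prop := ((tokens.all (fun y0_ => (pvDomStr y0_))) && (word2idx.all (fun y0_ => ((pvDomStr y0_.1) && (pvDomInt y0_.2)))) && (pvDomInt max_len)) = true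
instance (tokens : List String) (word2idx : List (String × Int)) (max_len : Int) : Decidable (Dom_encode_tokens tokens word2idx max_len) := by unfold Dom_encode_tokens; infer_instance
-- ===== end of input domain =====

-- B walks the output positions back-to-front with an explicit accumulator loop and one final
-- reverse, instead of A's staged encode-then-pad-or-slice passes (alternative decomposition, same cost).

-- ===== PORT A =====
def encode_tokens (tokens : List String) (word2idx : List (String × Int)) (max_len : Int) : List Int :=
  let d := PySem.Dict.mk word2idx
  let idxs := tokens.map (fun t => (d.get? t).getD ((d.get? "[UNK]").getD 0))
  let idxs_len : Int := idxs.length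
  if idxs_len < max_len then
    idxs ++ PySem.List.pyRepeat [(d.get? "[PAD]").getD 0] (max_len - idxs_len)
  else if max_len < idxs_len then
    PySem.List.slice idxs none (some max_len)
  else idxs

-- ===== PORT B =====
-- B's while loop: j counts the iterations still to run (the loop variable is i = j - 1),
-- each iteration appends its value to the accumulator rev.
def pvB_loop (body : Nat → Int) : Nat → List Int → List Int
  | 0, rev => rev
  | j + 1, rev => pvB_loop body j (rev ++ [body j])

def encode_tokens_alt (tokens : List String) (word2idx : List (String × Int)) (max_len : Int) : List Int :=
  let d := PySem.Dict.mk word2idx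
  let body : Nat → Int := fun i =>
    if (i : Int) < (tokens.length : Int) then
      (d.get? (PySem.List.pyGetD tokens (i : Int) "")).getD ((d.get? "[UNK]").getD 0)
    else (d.get? "[PAD]").getD 0
  (pvB_loop body max_len.toNat []).reverse

-- ===== PRECONDITION & SPEC =====
-- Pre_ excludes exactly the inputs where Python A raises KeyError: the '[UNK]' lookup (eagerly
-- evaluated once tokens is non-empty) and the '[PAD]' lookup (evaluated when padding is needed).
def Pre_encode_tokens (tokens : List String) (word2idx : List (String × Int)) (max_len : Int) : Prop :=
  (tokens = [] ∨ (PySem.Dict.mk word2idx).contains "[UNK]" = true) ∧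
  (max_len ≤ (tokens.length : Int) ∨ (PySem.Dict.mk word2idx).contains "[PAD]" = true)
instance (tokens : List String) (word2idx : List (String × Int)) (max_len : Int) : Decidable (Pre_encode_tokens tokens word2idx max_len) := by unfold Pre_encode_tokens; infer_instance

def pvWitness_encode_tokens : List String × (List (String × Int)) × Int :=
  (["a", "zz"], [("a", 1), ("[UNK]", 0), ("[PAD]", 9)], 4)

-- For max_len < 0 with len(tokens) > -max_len, A returns idxs[:max_len] (the encoded tokens with
-- the last -max_len dropped, a negative-slice artefact), while B returns [] — the intended value,
-- since the result should never be longer than max_len.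
def D_encode_tokens (tokens : List String) (word2idx : List (String × Int)) (max_len : Int) : Prop :=
  max_len < 0 ∧ 0 < (tokens.length : Int) + max_len
instance (tokens : List String) (word2idx : List (String × Int)) (max_len : Int) : Decidable (D_encode_tokens tokens word2idx max_len) := by unfold D_encode_tokens; infer_instance

def Spec_encode_tokens (tokens : List String) (word2idx : List (String × Int)) (max_len : Int) (out : List Int) : Prop := ¬ D_encode_tokens tokens word2idx max_len → out = encode_tokens_alt tokens word2idx max_len
instance (tokens : List String) (word2idx : List (String × Int)) (max_len : Int) (out : List Int) : Decidable (Spec_encode_tokens tokens word2idx max_len out) := by unfold Spec_encode_tokens; infer_instance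

def pvDiffWitness_encode_tokens : List String × (List (String × Int)) × Int :=
  (["a", "b"], [("a", 1), ("b", 2), ("[UNK]", 0)], -1)
def pvDiffWitnessOut_encode_tokens : (List Int) × (List Int) := ([1], [])

-- ===== CLAIM (what is proved, stated in full; the proofs are below) =====
def Claim_unchanged_encode_tokens : Prop := ∀ (tokens : List String) (word2idx : List (String × Int)) (max_len : Int), Dom_encode_tokens tokens word2idx max_len → Pre_encode_tokens tokens word2idx max_len → Spec_encode_tokens tokens word2idx max_len (encode_tokens tokens word2idx max_len)
def Claim_changed_encode_tokens : Prop := Dom_encode_tokens (pvDiffWitness_encode_tokens.1) (pvDiffWitness_encode_tokens.2.1) (pvDiffWitness_encode_tokens.2.2) ∧ Pre_encode_tokens (pvDiffWitness_encode_tokens.1) (pvDiffWitness_encode_tokens.2.1) (pvDiffWitness_encode_tokens.2.2) ∧ D_encode_tokens (pvDiffWitness_encode_tokens.1) (pvDiffWitness_encode_tokens.2.1) (pvDiffWitness_encode_tokens.2.2) ∧ encode_tokens (pvDiffWitness_encode_tokens.1) (pvDiffWitness_encode_tokens.2.1) (pvDiffWitness_encode_tokens.2.2) = pvDiffWitnessOut_encode_tokens.1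 ∧ encode_tokens_alt (pvDiffWitness_encode_tokens.1) (pvDiffWitness_encode_tokens.2.1) (pvDiffWitness_encode_tokens.2.2) = pvDiffWitnessOut_encode_tokens.2 ∧ pvDiffWitnessOut_encode_tokens.1 ≠ pvDiffWitnessOut_encode_tokens.2
def Claim_exact_encode_tokens : Prop := ∀ (tokens : List String) (word2idx : List (String × Int)) (max_len : Int), Dom_encode_tokens tokens word2idx max_len → Pre_encode_tokens tokens word2idx max_len → D_encode_tokens tokens word2idx max_len → encode_tokens tokens word2idx max_len ≠ encode_tokens_alt tokens word2idx max_len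

-- ===== LEMMAS AND PROOFS =====

-- The back-to-front loop accumulates the body values of positions j-1 .. 0, i.e. the
-- reversed map over range j, behind the accumulator.
theorem pvB_loop_eq (body : Nat → Int) (j : Nat) (rev : List Int) :
    pvB_loop body j rev = rev ++ ((List.range j).map body).reverse := by
  induction j generalizing rev with
  | zero => simp [pvB_loop]
  | succ j ih =>
    rw [pvB_loop, ih, List.range_succ]
    simp

-- The per-position body over range m equals "truncated map ++ padding".
theorem pv_range_pad (xs : List String) (enc : String → Int) (pad : Int) (m : Nat) :
    (List.range m).map (fun (k : Nat) => if (k : Int) < (xs.length : Int) then enc (PySem.List.pyGetD xs (k : Int) "") else pad)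
      = (xs.map enc).take m ++ List.replicate (m - xs.length) pad := by
  induction m with
  | zero => simp
  | succ m ih =>
    rw [List.range_succ, List.map_append, ih, List.map_singleton]
    by_cases h : m < xs.length
    · have h1 : (m : Int) < (xs.length : Int) := by exact_mod_cast h
      have h2 : m + 1 - xs.length = 0 := by omega
      have h3 : m - xs.length = 0 := by omega
      rw [if_pos h1, h2, h3]
      rw [PySem.List.pyGetD_natCast]
      have h4 : xs.getD m "" = xs[m] := List.getD_eq_getElem xs "" h
      rw [h4]
      have h5 : (xs.map enc).take (m + 1) = (xs.map enc).take m ++ [(xs.map enc)[m]'(by simpa using h)] :=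
        List.take_succ_eq_append_getElem (by simpa using h)
      simp [h5]
    · have h1 : ¬ ((m : Int) < (xs.length : Int)) := by omega
      have h2 : m + 1 - xs.length = (m - xs.length) + 1 := by omega
      rw [if_neg h1, h2, List.replicate_succ']
      have h3 : (xs.map enc).take (m + 1) = (xs.map enc).take m := by
        rw [List.take_of_length_le (by simp; omega), List.take_of_length_le (by simp; omega)]
      rw [h3, List.append_assoc]

-- B unfolded: the loop-and-reverse equals "truncated map ++ padding".
theorem pv_alt_eq (tokens : List String) (word2idx : List (String × Int)) (max_len : Int) :
    encode_tokens_alt tokens word2idx max_len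
      = ((tokens.map (fun t => ((PySem.Dict.mk word2idx).get? t).getD (((PySem.Dict.mk word2idx).get? "[UNK]").getD 0))).take max_len.toNat)
        ++ List.replicate (max_len.toNat - tokens.length) (((PySem.Dict.mk word2idx).get? "[PAD]").getD 0) := by
  show (pvB_loop (fun i =>
      if (i : Int) < (tokens.length : Int) then
        ((PySem.Dict.mk word2idx).get? (PySem.List.pyGetD tokens (i : Int) "")).getD
          (((PySem.Dict.mk word2idx).get? "[UNK]").getD 0)
      else ((PySem.Dict.mk word2idx).get? "[PAD]").getD 0) max_len.toNat []).reverse = _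
  rw [pvB_loop_eq]
  rw [List.nil_append, List.reverse_reverse]
  exact pv_range_pad tokens
    (fun t => ((PySem.Dict.mk word2idx).get? t).getD (((PySem.Dict.mk word2idx).get? "[UNK]").getD 0))
    (((PySem.Dict.mk word2idx).get? "[PAD]").getD 0) max_len.toNat

theorem encode_tokens_spec : Claim_unchanged_encode_tokens := by
  intro tokens word2idx max_len _ _ hD
  show encode_tokens tokens word2idx max_len = encode_tokens_alt tokens word2idx max_len
  rw [pv_alt_eq]
  unfold encode_tokens
  simp only []
  set d := PySem.Dict.mk word2idx with hd
  set idxs := tokens.map (fun t => (d.get? t).getD ((d.get? "[UNK]").getD 0)) with hidxs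
  have hlen : idxs.length = tokens.length := by simp [hidxs]
  by_cases hneg : max_len < 0
  · -- outside D_: tokens.length + max_len ≤ 0, both sides are []
    have hn : (tokens.length : Int) + max_len ≤ 0 := by
      by_contra hc
      exact hD ⟨hneg, by omega⟩
    have hml : max_len.toNat = 0 := by omega
    rw [hml]
    simp only [List.take_zero, Nat.zero_sub, List.replicate_zero, List.nil_append]
    have h1 : ¬ ((idxs.length : Int) < max_len) := by omega
    rw [if_neg h1]
    have h2 : max_len < (idxs.length : Int) := by omega
    rw [if_pos h2]
    set k : Nat := (-max_len).toNat with hk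
    have hkpos : 0 < k := by omega
    have hml' : max_len = -(k : Int) := by omega
    rw [hml', PySem.List.slice_to_neg_natCast idxs k hkpos]
    have h3 : idxs.length - k = 0 := by omega
    rw [h3, List.take_zero]
  · rw [not_lt] at hneg
    by_cases hlt : (idxs.length : Int) < max_len
    · rw [if_pos hlt, PySem.List.pyRepeat_singleton]
      have h1 : (idxs.take max_len.toNat) = idxs := List.take_of_length_le (by omega)
      have h2 : (max_len - (tokens.length : Int)).toNat = max_len.toNat - tokens.length := by omega
      rw [h1, hlen, h2]
    · rw [if_neg hlt]
      have hrep : max_len.toNat - tokens.length = 0 := by omega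
      rw [hrep, List.replicate_zero, List.append_nil]
      by_cases hgt : max_len < (idxs.length : Int)
      · rw [if_pos hgt, PySem.List.slice_to idxs hneg]
      · rw [if_neg hgt]
        exact (List.take_of_length_le (by omega)).symm

theorem encode_tokens_tight : Claim_exact_encode_tokens := by
  intro tokens word2idx max_len _ _ hD heq
  obtain ⟨hneg, hpos⟩ := hD
  -- B is empty, A has positive length
  have hB : encode_tokens_alt tokens word2idx max_len = [] := by
    rw [pv_alt_eq]
    have h0 : max_len.toNat = 0 := by omega
    rw [h0]
    simp
  rw [hB] at heq
  unfold encode_tokens at heq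
  simp only [] at heq
  set d := PySem.Dict.mk word2idx with hd
  set idxs := tokens.map (fun t => (d.get? t).getD ((d.get? "[UNK]").getD 0)) with hidxs
  have hlen : idxs.length = tokens.length := by simp [hidxs]
  have h1 : ¬ ((idxs.length : Int) < max_len) := by omega
  have h2 : max_len < (idxs.length : Int) := by omega
  rw [if_neg h1, if_pos h2] at heq
  set k : Nat := (-max_len).toNat with hk
  have hkpos : 0 < k := by omega
  have hml' : max_len = -(k : Int) := by omega
  rw [hml', PySem.List.slice_to_neg_natCast idxs k hkpos] at heq
  have hlength := congrArg List.length heq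
  simp at hlength
  omega

-- ===== VERDICT (by name: the statement is the Claim_ definition above) =====
theorem encode_tokens_changed : Claim_changed_encode_tokens := by
  unfold Claim_changed_encode_tokens; decide
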